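-- pv_equiv track=rewrite | github.com/pypi-data/pypi-mirror-359 | packages/ttyg-evaluation/ttyg_evaluation-2.2.0.tar.gz/ttyg_evaluation-2.2.0/ttyg_evaluation/sparql_results_comparison.py | get_permutation_indices
-- ===== SOURCE A (Python) =====
-- from collections import Counter
--
-- def get_permutation_indices(list1: list, list2: list) -> list:
--     if len(list1) != len(list2) or Counter(list1) != Counter(list2):
--         return []
--
--     indices = []
--     used = [False] * len(list1)
--
--     for item2 in list2:
--         for i in range(len(list1)):
--             if not used[i] and list1[i] == item2:
--                 indices.append(i)
--                 used[i] = True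
--                 break
--
--     return indices
-- ===== SOURCE B (Python) =====
-- from collections import Counter, defaultdict, deque
--
--
-- def get_permutation_indices(list1: list, list2: list) -> list:
--     if len(list1) != len(list2) or Counter(list1) != Counter(list2):
--         return []
--
--     queues = defaultdict(deque)
--     for i, v in enumerate(list1):
--         queues[v].append(i)
--
--     return [queues[v].popleft() for v in list2]
-- ===== Notes on version B (the rewrite author's own statement) =====
-- stated objective: faster
-- what changed: Replaces the per-item linear scan over a used-flags array with a dict mapping each value to a deque of its list1 indices, popped from the front per item of list2.
import Mathlib
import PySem

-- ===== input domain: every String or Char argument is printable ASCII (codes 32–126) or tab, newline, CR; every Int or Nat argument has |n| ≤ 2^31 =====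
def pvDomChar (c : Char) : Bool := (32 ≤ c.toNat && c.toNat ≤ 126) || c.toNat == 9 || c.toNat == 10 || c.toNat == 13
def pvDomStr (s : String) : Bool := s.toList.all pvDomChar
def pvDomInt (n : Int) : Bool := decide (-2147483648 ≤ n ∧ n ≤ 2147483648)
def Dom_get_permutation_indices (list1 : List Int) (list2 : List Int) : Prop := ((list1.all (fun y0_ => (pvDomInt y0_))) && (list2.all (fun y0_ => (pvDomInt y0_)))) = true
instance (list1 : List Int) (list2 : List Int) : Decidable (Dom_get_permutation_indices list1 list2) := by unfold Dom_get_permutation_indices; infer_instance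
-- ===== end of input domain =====

-- B replaces A's per-item linear scan over a used-flags array by a dict mapping each value to
-- the queue of its list1 indices, popped from the front (objective: faster).

-- ===== PORT A =====
-- Shared guard helper: BOTH Pythons start with the identical line
--   `if len(list1) != len(list2) or Counter(list1) != Counter(list2): return []`.
-- Python's Counter == compares the two count mappings (order-insensitive, missing key = 0).
def countersEq (l1 l2 : List Int) : Bool :=
  let c1 := PySem.Dict.counter l1
  let c2 := PySem.Dict.counter l2
  c1.keys.all (fun k => c2.getD k 0 == c1.getD k 0) &&
  c2.keys.all (fun k => c1.getD k 0 == c2.getD k 0)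

-- A's inner loop: `for i in range(len(list1)): if not used[i] and list1[i] == item2: …; break`
-- (i runs over range(len(list1)) and len(used) = len(list1), so the getD defaults are never read)
def scanA (list1 : List Int) (used : List Bool) (v : Int) : List Nat → Option Nat
  | [] => none
  | i :: rest =>
    if !(used.getD i false) && list1.getD i 0 == v then some i
    else scanA list1 used v rest

def get_permutation_indices (list1 : List Int) (list2 : List Int) : List Int :=
  if !(list1.length == list2.length) || !(countersEq list1 list2) then []
  else
    (list2.foldl
      (fun (st : List Int × List Bool) item2 =>
        match scanA list1 st.2 item2 (List.range list1.length) with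
        | some i => (st.1 ++ [(i : Int)], st.2.set i true)
        | none => st)
      ([], List.replicate list1.length false)).1

-- ===== PORT B =====
def get_permutation_indices_alt (list1 : List Int) (list2 : List Int) : List Int :=
  if !(list1.length == list2.length) || !(countersEq list1 list2) then []
  else
    -- `queues = defaultdict(deque); for i, v in enumerate(list1): queues[v].append(i)`
    let queues := (PySem.List.enumerate list1).foldl
      (fun (d : PySem.Dict Int (List Int)) p => d.modify p.2 [] (· ++ [p.1]))
      PySem.Dict.empty
    -- `[queues[v].popleft() for v in list2]`
    (list2.foldl
      (fun (st : List Int × PySem.Dict Int (List Int)) v =>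
        match st.2.getD v [] with
        | [] => st   -- Python's popleft would raise IndexError here; unreachable under the Counter guard
        | i :: rest => (st.1 ++ [i], st.2.insert v rest))
      ([], queues)).1

-- ===== PRECONDITION & SPEC =====
def Spec_get_permutation_indices (list1 : List Int) (list2 : List Int) (out : List Int) : Prop := out = get_permutation_indices_alt list1 list2
instance (list1 : List Int) (list2 : List Int) (out : List Int) : Decidable (Spec_get_permutation_indices list1 list2 out) := by unfold Spec_get_permutation_indices; infer_instance

-- ===== CLAIM (what is proved, stated in full; the proofs are below) =====
def Claim_equal_get_permutation_indices : Prop := ∀ (list1 : List Int) (list2 : List Int), Dom_get_permutation_indices list1 list2 → Spec_get_permutation_indices list1 list2 (get_permutation_indices list1 list2)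

-- ===== LEMMAS AND PROOFS =====

-- the still-unused indices of list1 holding value v, in increasing order
def availF (list1 : List Int) (used : List Bool) (v : Int) : List Nat :=
  (List.range list1.length).filter
    (fun i => !(used.getD i false) && list1.getD i 0 == v)

-- A's inner scan returns the first still-unused index holding v
theorem scanA_eq_head (list1 : List Int) (used : List Bool) (v : Int) :
    ∀ idxs : List Nat, scanA list1 used v idxs =
      (idxs.filter (fun i => !(used.getD i false) && list1.getD i 0 == v)).head? := by
  intro idxs
  induction idxs with
  | nil => rfl
  | cons i rest ih =>
    simp only [scanA, List.filter_cons]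
    split_ifs with h <;> simp [ih]

-- indices of the elements of l equal to v, as enumerate yields them
theorem enum_filter (v : Int) :
    ∀ (l : List Int) (s : Int),
      ((PySem.List.enumerate l s).filter (fun p => p.2 == v)).map (·.1)
        = ((List.range l.length).filter (fun i => l.getD i 0 == v)).map (fun i : Nat => s + (i : Int)) := by
  intro l
  induction l with
  | nil => intro s; rfl
  | cons a t ih =>
    intro s
    have hcomp : ((fun i => (a :: t).getD i 0 == v) ∘ Nat.succ) = (fun i => t.getD i 0 == v) := rfl
    simp only [PySem.List.enumerate, List.filter_cons, List.length_cons,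
      List.range_succ_eq_map, List.filter_map, hcomp]
    have hmap : ∀ X : List Nat, (X.map Nat.succ).map (fun i : Nat => s + (i : Int))
        = X.map (fun i : Nat => (s + 1) + (i : Int)) := by
      intro X
      rw [List.map_map]
      exact List.map_congr_left (fun i _ => by simp [Function.comp]; ring)
    have h0 : (a :: t).getD 0 0 = a := rfl
    by_cases ha : (a == v) = true
    · rw [if_pos ha, if_pos (h0 ▸ ha), List.map_cons, List.map_cons, ih (s + 1), hmap]
      simp
    · rw [if_neg ha, if_neg (h0 ▸ ha), ih (s + 1), hmap]

theorem getD_replicate_false (n i : Nat) : (List.replicate n false).getD i false = false := by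
  simp [List.getD, List.getElem?_replicate]; split <;> rfl

-- B's queue-building fold produces exactly the per-value index lists of a fresh used array
theorem init_queues (list1 : List Int) (v : Int) :
    ((PySem.List.enumerate list1).foldl
      (fun (d : PySem.Dict Int (List Int)) p => d.modify p.2 [] (· ++ [p.1]))
      PySem.Dict.empty).getD v []
      = (availF list1 (List.replicate list1.length false) v).map (fun i : Nat => (i : Int)) := by
  have hfold : ((PySem.List.enumerate list1).map (fun p => (p.2, p.1))).foldl
      (fun (d : PySem.Dict Int (List Int)) p => d.modify p.1 [] (· ++ [p.2])) PySem.Dict.empty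
      = (PySem.List.enumerate list1).foldl
      (fun (d : PySem.Dict Int (List Int)) p => d.modify p.2 [] (· ++ [p.1])) PySem.Dict.empty := by
    rw [List.foldl_map]
  rw [← hfold, PySem.Dict.getD_foldl_modify_append]
  rw [List.filter_map, List.map_map]
  have hpred : ((fun (p : Int × Int) => p.1 == v) ∘ (fun p => (p.2, p.1)))
      = (fun (p : Int × Int) => p.2 == v) := rfl
  rw [hpred]
  have : ((fun (p : Int × Int) => p.2) ∘ (fun (p : Int × Int) => (p.2, p.1)))
      = (fun (p : Int × Int) => p.1) := rfl
  rw [this, enum_filter v list1 0]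
  unfold availF
  have : (fun i => !((List.replicate list1.length false).getD i false) && list1.getD i 0 == v)
      = (fun i => list1.getD i 0 == v) := by
    funext i; rw [getD_replicate_false]; simp
  rw [this]
  simp

-- falsifying the filter predicate exactly at the head of the filtered list drops that head
theorem filter_pop (p q : Nat → Bool) (i : Nat) :
    ∀ (l : List Nat) (rest : List Nat), l.Nodup → l.filter p = i :: rest →
      (∀ j, j ≠ i → q j = p j) → q i = false → l.filter q = rest := by
  intro l
  induction l with
  | nil => intro rest _ h; simp at h
  | cons a t ih =>
    intro rest hnd hf hq hqi
    simp only [List.filter_cons] at hf ⊢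
    rcases List.nodup_cons.mp hnd with ⟨hat, hndt⟩
    by_cases hpa : p a
    · simp only [hpa, if_pos] at hf
      obtain ⟨rfl, rfl⟩ : a = i ∧ t.filter p = rest :=
        ⟨(List.cons_eq_cons.mp hf).1, (List.cons_eq_cons.mp hf).2⟩
      simp only [hqi, Bool.false_eq_true, if_neg, not_false_eq_true]
      exact List.filter_congr (fun j hj => hq j (fun h => hat (h ▸ hj)))
    · simp only [hpa, Bool.false_eq_true, if_neg, not_false_eq_true] at hf
      have hqa : q a = false := by
        by_cases hai : a = i
        · exact hai ▸ hqi
        · rw [hq a hai]; exact Bool.eq_false_iff.mpr hpa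
      simp only [hqa, Bool.false_eq_true, if_neg, not_false_eq_true]
      exact ih rest hndt hf hq hqi

theorem getD_set_self (l : List Bool) (i : Nat) (h : i < l.length) (b : Bool) :
    (l.set i b).getD i false = b := by
  simp [List.getD, h]

theorem getD_set_ne (l : List Bool) (i j : Nat) (h : j ≠ i) (b : Bool) :
    (l.set i b).getD j false = l.getD j false := by
  simp [List.getD, List.getElem?_set_ne (Ne.symm h)]

-- main invariant: A's (output, used) fold and B's (output, queues) fold stay in lock-step
theorem loop_eq (list1 : List Int) :
    ∀ (l2 : List Int) (acc : List Int) (used : List Bool) (d : PySem.Dict Int (List Int)),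
      used.length = list1.length →
      (∀ v, d.getD v [] = (availF list1 used v).map (fun i : Nat => (i : Int))) →
      (l2.foldl
        (fun (st : List Int × List Bool) item2 =>
          match scanA list1 st.2 item2 (List.range list1.length) with
          | some i => (st.1 ++ [(i : Int)], st.2.set i true)
          | none => st)
        (acc, used)).1
      = (l2.foldl
          (fun (st : List Int × PySem.Dict Int (List Int)) v =>
            match st.2.getD v [] with
            | [] => st
            | i :: rest => (st.1 ++ [i], st.2.insert v rest))
          (acc, d)).1 := by
  intro l2
  induction l2 with
  | nil => intro acc used d _ _; rfl
  | cons v t ih =>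
    intro acc used d hlen hinv
    simp only [List.foldl_cons]
    have hscan : scanA list1 used v (List.range list1.length) = (availF list1 used v).head? :=
      scanA_eq_head list1 used v (List.range list1.length)
    cases h : availF list1 used v with
    | nil =>
      rw [h] at hscan
      have hd : d.getD v [] = [] := by rw [hinv v, h]; rfl
      simp only [hscan, hd]
      exact ih acc used d hlen hinv
    | cons i rest =>
      rw [h] at hscan
      have hd : d.getD v [] = (i : Int) :: rest.map (fun i : Nat => (i : Int)) := by
        rw [hinv v, h]; rfl
      have hi : i ∈ (List.range list1.length).filter
          (fun j => !(used.getD j false) && list1.getD j 0 == v) := by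
        unfold availF at h; rw [h]; exact List.mem_cons_self
      have hiR : i < list1.length := List.mem_range.mp (List.mem_of_mem_filter hi)
      have hip : (!(used.getD i false) && list1.getD i 0 == v) = true := (List.mem_filter.mp hi).2
      have hval : list1.getD i 0 = v := by
        have := (Bool.and_eq_true _ _).mp hip
        exact eq_of_beq this.2
      simp only [hscan, hd]
      apply ih
      · rw [List.length_set]; exact hlen
      · intro w
        rw [PySem.Dict.getD_insert]
        by_cases hw : w = v
        · subst hw
          rw [if_pos rfl]
          have : availF list1 (used.set i true) w = rest := by
            apply filter_pop _ _ i _ rest (List.nodup_range) h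
            · intro j hj
              rw [getD_set_ne used i j hj]
            · rw [getD_set_self used i (hlen ▸ hiR) true]
              simp
          rw [this]
        · rw [if_neg hw, hinv w]
          congr 1
          unfold availF
          apply List.filter_congr
          intro j hj
          by_cases hji : j = i
          · subst hji
            rw [getD_set_self used j (hlen ▸ hiR) true, hval]
            simp [Ne.symm hw]
          · rw [getD_set_ne used i j hji]

-- ===== VERDICT (by name: the statement is the Claim_ definition above) =====
theorem get_permutation_indices_spec : Claim_equal_get_permutation_indices := by
  intro list1 list2 _
  unfold Spec_get_permutation_indices get_permutation_indices get_permutation_indices_alt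
  split_ifs with h
  · rfl
  · exact loop_eq list1 list2 [] _ _ (List.length_replicate) (fun v => init_queues list1 v)
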